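-- pv_equiv track=rewrite | github.com/VidMegushar/AOC_2015 | day1.py | enter_basement
-- ===== SOURCE A (Python) =====
-- def enter_basement(house):
--     tmp_floor = 0
--     cur_step = 0
--     for fl in house:
--         cur_step += 1
--         if fl == "(": tmp_floor += 1
--         else: tmp_floor -= 1
--
--         if tmp_floor == -1: return cur_step
-- ===== SOURCE B (Python) =====
-- def enter_basement(house):
--     # Positions (1-based) of the characters that move the floor down (anything not "(").
--     closers = [p for p, c in enumerate(house, 1) if c != "("]
--     # The floor first reaches -1 exactly at the first j-th closer whose position is 2*j - 1
--     # (at that point the prefix holds j closers and j-1 openers).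
--     return next((p for j, p in enumerate(closers, 1) if p == 2 * j - 1), None)
-- ===== Notes on version B (the rewrite author's own statement) =====
-- stated objective: alternative
-- what changed: Drops the running floor counter entirely: B lists the 1-based positions of all non-'(' characters and returns the first j-th such position p satisfying the arithmetic characterization p == 2*j-1 (a prefix with j closers and j-1 openers).
import Mathlib
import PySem

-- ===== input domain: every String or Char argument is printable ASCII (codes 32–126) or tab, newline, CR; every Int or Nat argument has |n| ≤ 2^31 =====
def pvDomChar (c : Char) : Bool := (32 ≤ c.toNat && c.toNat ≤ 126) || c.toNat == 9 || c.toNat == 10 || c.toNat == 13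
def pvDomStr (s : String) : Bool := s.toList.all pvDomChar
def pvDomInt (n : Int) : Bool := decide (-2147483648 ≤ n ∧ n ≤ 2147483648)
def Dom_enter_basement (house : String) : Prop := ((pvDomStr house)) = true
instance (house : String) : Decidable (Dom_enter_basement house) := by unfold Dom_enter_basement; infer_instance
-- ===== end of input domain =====

-- B drops the running floor counter: it lists the positions of the non-'(' characters and
-- returns the first j-th such position p with p = 2*j - 1 (alternative characterization; return value only).

-- ===== PORT A =====
-- A's loop: for fl in house, incrementing cur_step, adjusting tmp_floor, early return at -1
def enterA : List Char → Int → Int → Option Int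
  | [], _, _ => none
  | fl :: rest, tmp_floor, cur_step =>
      let cur_step' := cur_step + 1
      let tmp_floor' := if fl = '(' then tmp_floor + 1 else tmp_floor - 1
      if tmp_floor' = -1 then some cur_step' else enterA rest tmp_floor' cur_step'

def enter_basement (house : String) : Option Int :=
  enterA house.toList 0 0

-- ===== PORT B =====
def enter_basement_alt (house : String) : Option Int :=
  -- closers = [p for p, c in enumerate(house, 1) if c != "("]
  let closers := ((PySem.List.enumerate house.toList 1).filter (fun pc => pc.2 != '(')).map Prod.fst
  -- next((p for j, p in enumerate(closers, 1) if p == 2*j - 1), None)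
  ((PySem.List.enumerate closers 1).find? (fun jp => jp.2 == 2 * jp.1 - 1)).map Prod.snd

-- ===== PRECONDITION & SPEC =====
def Spec_enter_basement (house : String) (out : Option Int) : Prop := out = enter_basement_alt house
instance (house : String) (out : Option Int) : Decidable (Spec_enter_basement house out) := by unfold Spec_enter_basement; infer_instance

-- ===== CLAIM (what is proved, stated in full; the proofs are below) =====
def Claim_equal_enter_basement : Prop := ∀ (house : String), Dom_enter_basement house → Spec_enter_basement house (enter_basement house)

-- ===== LEMMAS AND PROOFS =====

-- fused form of B's two staged passes
def findCl : List Char → Int → Int → Option Int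
  | [], _, _ => none
  | c :: cs, p, j =>
      if c = '(' then findCl cs (p + 1) j
      else if p = 2 * j - 1 then some p else findCl cs (p + 1) (j + 1)

theorem alt_eq_findCl (cs : List Char) : ∀ (p j : Int),
    ((PySem.List.enumerate (((PySem.List.enumerate cs p).filter (fun pc => pc.2 != '(')).map Prod.fst) j).find?
      (fun jp => jp.2 == 2 * jp.1 - 1)).map Prod.snd = findCl cs p j := by
  induction cs with
  | nil => intro p j; simp [PySem.List.enumerate_nil, findCl]
  | cons c cs ih =>
      intro p j
      by_cases hc : c = '('
      · simp [PySem.List.enumerate_cons, hc, findCl, ih]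
      · simp only [PySem.List.enumerate_cons, List.filter_cons, findCl, hc]
        simp only [bne_iff_ne, ne_eq, hc, not_false_eq_true, if_true, List.map_cons,
          PySem.List.enumerate_cons, List.find?_cons]
        by_cases hp : p = 2 * j - 1
        · simp [hp]
        · have : (p == 2 * j - 1) = false := by simp [hp]
          simp [this, hp, ih]

theorem enterA_eq_findCl (cs : List Char) : ∀ (f s j : Int),
    f = s - 2 * j → 0 ≤ f → enterA cs f s = findCl cs (s + 1) (j + 1) := by
  induction cs with
  | nil => intro f s j _ _; simp [enterA, findCl]
  | cons c cs ih =>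
      intro f s j hf hnn
      by_cases hc : c = '('
      · have h1 : ¬ (f + 1 = -1) := by omega
        simp only [enterA, findCl, hc, if_true, h1, if_false]
        exact ih (f + 1) (s + 1) j (by omega) (by omega)
      · simp only [enterA, findCl, hc, if_false]
        by_cases h1 : f - 1 = -1
        · have hp : s + 1 = 2 * (j + 1) - 1 := by omega
          simp [h1, hp]
        · have hp : ¬ (s + 1 = 2 * (j + 1) - 1) := by omega
          simp only [h1, if_false, hp]
          exact ih (f - 1) (s + 1) (j + 1) (by omega) (by omega)

-- ===== VERDICT (by name: the statement is the Claim_ definition above) =====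
theorem enter_basement_spec : Claim_equal_enter_basement := by
  intro house _
  unfold Spec_enter_basement enter_basement enter_basement_alt
  rw [alt_eq_findCl]
  exact enterA_eq_findCl house.toList 0 0 0 (by ring) le_rfl
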